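-- pv_equiv track=rewrite | github.com/Zachanardo/Intellicrack | intellicrack/core/analysis/obfuscation_detectors/api_obfuscation_detector.py | _find_missing_common_apis
-- ===== SOURCE A (Python) =====
-- from typing import Any, Dict, List, Optional, Set, Tuple
--
-- def _find_missing_common_apis(import_names: List[str]) -> List[str]:
--     """Find commonly used APIs that are missing from imports"""
--     common_apis = [
--         'CreateFile', 'ReadFile', 'WriteFile', 'CloseHandle',
--         'VirtualAlloc', 'MessageBox', 'GetCurrentProcess',
--         'CreateThread', 'WaitForSingleObject'
--     ]
--
--     missing = []
--     for api in common_apis: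
--         if not any(api.lower() in name for name in import_names):
--             missing.append(api)
--
--     return missing
-- ===== SOURCE B (Python) =====
-- def _find_missing_common_apis(import_names):
--     """Find commonly used APIs that are missing from imports."""
--     common_apis = [
--         'CreateFile', 'ReadFile', 'WriteFile', 'CloseHandle',
--         'VirtualAlloc', 'MessageBox', 'GetCurrentProcess',
--         'CreateThread', 'WaitForSingleObject'
--     ]
--     # Multi-pattern matcher: bucket the lowered patterns by their first
--     # character, scan each name position by position, and mark every
--     # pattern that starts there in a found-flag table.
--     by_first = {}
--     for idx, api in enumerate(common_apis):
--         p = api.lower()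
--         by_first.setdefault(p[0], []).append((idx, p))
--     found = [False] * len(common_apis)
--     for name in import_names:
--         for i in range(len(name)):
--             for idx, p in by_first.get(name[i], ()):
--                 if name.startswith(p, i):
--                     found[idx] = True
--     return [api for idx, api in enumerate(common_apis) if not found[idx]]
-- ===== Notes on version B (the rewrite author's own statement) =====
-- stated objective: alternative
-- what changed: B replaces A's per-API substring ('in') scans with a text-driven multi-pattern matcher: it buckets the lowered API patterns by first character in a dict, scans each import name position by position doing a bucket lookup and explicit startswith tests at each offset, marks matches in a found-flag table, then emits unmatched APIs in order.
import Mathlib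
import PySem

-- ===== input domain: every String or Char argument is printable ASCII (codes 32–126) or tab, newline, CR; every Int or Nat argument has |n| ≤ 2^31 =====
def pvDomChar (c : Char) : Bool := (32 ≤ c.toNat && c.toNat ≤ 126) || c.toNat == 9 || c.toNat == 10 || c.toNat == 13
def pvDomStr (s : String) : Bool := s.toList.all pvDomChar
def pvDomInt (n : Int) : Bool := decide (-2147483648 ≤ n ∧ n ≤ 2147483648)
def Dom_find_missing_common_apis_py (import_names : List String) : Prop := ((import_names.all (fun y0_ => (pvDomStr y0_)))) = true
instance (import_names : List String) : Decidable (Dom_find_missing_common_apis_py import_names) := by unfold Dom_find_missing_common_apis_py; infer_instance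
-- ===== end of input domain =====

-- B replaces A's per-API substring scans by a text-driven multi-pattern matcher: a first-character bucket dict over the lowered patterns, a position-by-position scan of each name with explicit prefix tests, a found-flag table, then one ordered emission pass (alternative decomposition, same results).


def pvCommonApis : List String :=
  ["CreateFile", "ReadFile", "WriteFile", "CloseHandle",
   "VirtualAlloc", "MessageBox", "GetCurrentProcess",
   "CreateThread", "WaitForSingleObject"]

-- ===== PORT A =====
-- for api in common_apis: if not any(api.lower() in name for name in import_names): missing.append(api)
def find_missing_common_apis_py (import_names : List String) : List String :=
  pvCommonApis.foldl
    (fun missing api =>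
      if !(import_names.any (fun name => PySem.Str.isIn (PySem.Str.lower api) name)) then
        missing ++ [api]
      else missing)
    []

-- ===== PORT B =====
-- by_first: bucket dict keyed by the first character of each lowered pattern
-- (p[0] read via head?; every api is a nonempty literal, so the none branch is unreachable)
def pvByFirst : PySem.Dict Char (List (Int × String)) :=
  (PySem.List.enumerate pvCommonApis 0).foldl
    (fun d q =>
      let p := PySem.Str.lower q.2
      match p.toList.head? with
      | some c => d.modify c [] (· ++ [(q.1, p)])
      | none => d)
    PySem.Dict.empty

-- per-name scan: for i in range(len(name)): for (idx, p) in by_first.get(name[i], ()):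
--   if name.startswith(p, i): found[idx] = True
-- name.startswith(p, i) ported as p.toList.isPrefixOf (name.toList.drop i): exact for 0 ≤ i
def pvScanName (found : List Bool) (name : String) : List Bool :=
  (List.range name.toList.length).foldl
    (fun found i =>
      match name.toList[i]? with
      | some c =>
        (pvByFirst.getD c []).foldl
          (fun found q =>
            if q.2.toList.isPrefixOf (name.toList.drop i) then PySem.List.pySetD found q.1 true
            else found)
          found
      | none => found)
    found

def find_missing_common_apis_py_alt (import_names : List String) : List String :=
  let found := import_names.foldl pvScanName (List.replicate pvCommonApis.length false)
  (PySem.List.enumerate pvCommonApis 0).foldl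
    (fun acc q => if !(PySem.List.pyGetD found q.1 false) then acc ++ [q.2] else acc) []

-- ===== PRECONDITION & SPEC =====
def Spec_find_missing_common_apis_py (import_names : List String) (out : List String) : Prop := out = find_missing_common_apis_py_alt import_names
instance (import_names : List String) (out : List String) : Decidable (Spec_find_missing_common_apis_py import_names out) := by unfold Spec_find_missing_common_apis_py; infer_instance

-- ===== CLAIM (what is proved, stated in full; the proofs are below) =====
def Claim_equal_find_missing_common_apis_py : Prop := ∀ (import_names : List String), Dom_find_missing_common_apis_py import_names → Spec_find_missing_common_apis_py import_names (find_missing_common_apis_py import_names)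

-- ===== LEMMAS AND PROOFS =====

-- the nine (index, lowered pattern) pairs, in api order
def pvAllPairs : List (Int × String) :=
  [(0, "createfile"), (1, "readfile"), (2, "writefile"), (3, "closehandle"),
   (4, "virtualalloc"), (5, "messagebox"), (6, "getcurrentprocess"),
   (7, "createthread"), (8, "waitforsingleobject")]

theorem pvByFirst_eq : pvByFirst = PySem.Dict.mk
  [('c', [(0, "createfile"), (3, "closehandle"), (7, "createthread")]),
   ('r', [(1, "readfile")]),
   ('w', [(2, "writefile"), (8, "waitforsingleobject")]),
   ('v', [(4, "virtualalloc")]),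
   ('m', [(5, "messagebox")]),
   ('g', [(6, "getcurrentprocess")])] := by decide
theorem pv_bucket (c : Char) :
    pvByFirst.getD c [] = pvAllPairs.filter (fun q => q.2.toList.head? == some c) := by
  by_cases h1 : c = 'c'; · subst h1; decide
  by_cases h2 : c = 'r'; · subst h2; decide
  by_cases h3 : c = 'w'; · subst h3; decide
  by_cases h4 : c = 'v'; · subst h4; decide
  by_cases h5 : c = 'm'; · subst h5; decide
  by_cases h6 : c = 'g'; · subst h6; decide
  rw [pvByFirst_eq]
  simp [PySem.Dict.getD_eq_get?_getD, pvAllPairs,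
    Ne.symm h1, Ne.symm h2, Ne.symm h3, Ne.symm h4, Ne.symm h5, Ne.symm h6, PySem.Dict.get?]

theorem pv_prefix_false_of_head_ne (p s : List Char) (hp : p ≠ []) (h : p.head? ≠ s.head?) :
    p.isPrefixOf s = false := by
  cases p with
  | nil => exact absurd rfl hp
  | cons a as =>
    cases s with
    | nil => rfl
    | cons b bs =>
      simp only [List.head?_cons, ne_eq, Option.some.injEq] at h
      simp [List.isPrefixOf, h]

theorem pv_foldl_filter_id {α β : Type} (f : β → α → β) (keep : α → Bool) (l : List α)
    (h : ∀ b a, a ∈ l → keep a = false → f b a = b) :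
    ∀ b : β, (l.filter keep).foldl f b = l.foldl f b := by
  induction l with
  | nil => intro b; rfl
  | cons x xs ih =>
    intro b
    by_cases hx : keep x = true
    · simp only [List.filter_cons, hx, if_pos, List.foldl_cons]
      exact ih (fun b a ha => h b a (List.mem_cons_of_mem _ ha)) (f b x)
    · have hx' : keep x = false := by simpa using hx
      simp only [List.filter_cons, hx', List.foldl_cons, Bool.false_eq_true, if_neg, not_false_iff]
      rw [h b x (List.mem_cons_self) hx']
      exact ih (fun b a ha => h b a (List.mem_cons_of_mem _ ha)) b

theorem pv_getD_foldl_set (s : List Char) (j : Nat) :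
    ∀ (l : List (Int × String)) (found : List Bool),
      (∀ q ∈ l, 0 ≤ q.1 ∧ q.1.toNat < found.length) →
      (l.foldl (fun fd q => if q.2.toList.isPrefixOf s then PySem.List.pySetD fd q.1 true else fd)
          found).getD j false
        = (found.getD j false || l.any (fun q => q.1.toNat == j && q.2.toList.isPrefixOf s)) := by
  intro l
  induction l with
  | nil => intro found _; simp
  | cons q rest ih =>
    intro found hidx
    obtain ⟨hq0, hqlt⟩ := hidx q List.mem_cons_self
    simp only [List.foldl_cons, List.any_cons]
    by_cases hpre : q.2.toList.isPrefixOf s = true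
    · rw [if_pos hpre, PySem.List.pySetD_of_nonneg (h := hq0)]
      rw [ih (found.set q.1.toNat true) (by
        intro r hr
        obtain ⟨h0, hl⟩ := hidx r (List.mem_cons_of_mem _ hr)
        exact ⟨h0, by simpa using hl⟩)]
      have : (found.set q.1.toNat true).getD j false
          = if q.1.toNat = j then true else found.getD j false := by
        simp only [List.getD_eq_getElem?_getD, List.getElem?_set]
        split_ifs with h1
        · subst h1; simp
        · rfl
      rw [this, hpre]
      by_cases hj : q.1.toNat = j
      · simp [hj]
      · have hb : (q.1.toNat == j) = false := by simp [hj]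
        simp [hj, hb]
    · have hpre' : q.2.toList.isPrefixOf s = false := by simp only [Bool.not_eq_true] at hpre; exact hpre
      rw [if_neg (by simp [hpre'])]
      rw [ih found (fun r hr => hidx r (List.mem_cons_of_mem _ hr))]
      simp [hpre']

theorem pv_length_foldl_set (s : List Char) :
    ∀ (l : List (Int × String)) (found : List Bool),
      (l.foldl (fun fd q => if q.2.toList.isPrefixOf s then PySem.List.pySetD fd q.1 true else fd)
          found).length = found.length := by
  intro l
  induction l with
  | nil => intro found; rfl
  | cons q rest ih =>
    intro found
    simp only [List.foldl_cons]
    by_cases hpre : q.2.toList.isPrefixOf s = true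
    · rw [if_pos hpre, ih, PySem.List.length_pySetD]
    · rw [if_neg hpre, ih]

theorem pv_step_eq (name : String) (i : Nat) (hi : i < name.toList.length) (found : List Bool) :
    (match name.toList[i]? with
     | some c =>
       (pvByFirst.getD c []).foldl
         (fun found q =>
           if q.2.toList.isPrefixOf (name.toList.drop i) then PySem.List.pySetD found q.1 true
           else found)
         found
     | none => found)
    = pvAllPairs.foldl
        (fun fd q => if q.2.toList.isPrefixOf (name.toList.drop i) then PySem.List.pySetD fd q.1 true else fd)
        found := by
  have hc : name.toList[i]? = some name.toList[i] := List.getElem?_eq_getElem hi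
  rw [hc]
  simp only []
  rw [pv_bucket]
  apply pv_foldl_filter_id
  intro b q hq hkeep
  have hnil : q.2.toList ≠ [] := by
    have h9 : ∀ q ∈ pvAllPairs, q.2.toList ≠ [] := by decide
    exact h9 q hq
  have hhead : (name.toList.drop i).head? = some name.toList[i] := by
    rw [List.head?_drop, hc]
  have hne : q.2.toList.head? ≠ (name.toList.drop i).head? := by
    rw [hhead]; simpa using hkeep
  rw [pv_prefix_false_of_head_ne _ _ hnil hne]
  simp

theorem pv_getD_fold_idxs (name : String) (j : Nat) :
    ∀ (idxs : List Nat) (found : List Bool), (∀ i ∈ idxs, i < name.toList.length) →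
      found.length = 9 →
      ((idxs.foldl
          (fun found i =>
            match name.toList[i]? with
            | some c =>
              (pvByFirst.getD c []).foldl
                (fun found q =>
                  if q.2.toList.isPrefixOf (name.toList.drop i) then PySem.List.pySetD found q.1 true
                  else found)
                found
            | none => found)
          found).getD j false
        = (found.getD j false ||
           idxs.any (fun i => pvAllPairs.any (fun q => q.1.toNat == j && q.2.toList.isPrefixOf (name.toList.drop i))))) := by
  intro idxs
  induction idxs with
  | nil => intro found _ _; simp
  | cons i rest ih =>
    intro found hlt hlen
    have hi : i < name.toList.length := hlt i List.mem_cons_self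
    have hbounds : ∀ q ∈ pvAllPairs, 0 ≤ q.1 ∧ q.1.toNat < found.length := by
      rw [hlen]; decide
    simp only [List.foldl_cons, List.any_cons]
    rw [pv_step_eq name i hi found]
    rw [ih _ (fun i' hi' => hlt i' (List.mem_cons_of_mem _ hi'))
        (by rw [pv_length_foldl_set]; exact hlen)]
    rw [pv_getD_foldl_set _ _ _ _ hbounds]
    rw [Bool.or_assoc]

theorem pv_length_scanName (name : String) (found : List Bool) :
    (pvScanName found name).length = found.length := by
  unfold pvScanName
  have : ∀ (idxs : List Nat) (found : List Bool), (∀ i ∈ idxs, i < name.toList.length) →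
      (idxs.foldl
          (fun found i =>
            match name.toList[i]? with
            | some c =>
              (pvByFirst.getD c []).foldl
                (fun found q =>
                  if q.2.toList.isPrefixOf (name.toList.drop i) then PySem.List.pySetD found q.1 true
                  else found)
                found
            | none => found)
          found).length = found.length := by
    intro idxs
    induction idxs with
    | nil => intro found _; rfl
    | cons i rest ih =>
      intro found hlt
      simp only [List.foldl_cons]
      rw [ih _ (fun i' hi' => hlt i' (List.mem_cons_of_mem _ hi')),
          pv_step_eq name i (hlt i List.mem_cons_self) found, pv_length_foldl_set]
  exact this _ found (by intro i hi; exact List.mem_range.mp hi)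

theorem pv_getD_scanName (name : String) (found : List Bool) (hlen : found.length = 9) (j : Nat) :
    (pvScanName found name).getD j false
      = (found.getD j false ||
         pvAllPairs.any (fun q => q.1.toNat == j &&
           (List.range name.toList.length).any (fun i => q.2.toList.isPrefixOf (name.toList.drop i)))) := by
  unfold pvScanName
  rw [pv_getD_fold_idxs name j (List.range name.toList.length) found
      (fun i hi => List.mem_range.mp hi) hlen]
  congr 1
  rw [Bool.eq_iff_iff]
  simp only [List.any_eq_true, Bool.and_eq_true]
  constructor
  · rintro ⟨i, hi, q, hq, hj, hpre⟩; exact ⟨q, hq, hj, i, hi, hpre⟩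
  · rintro ⟨q, hq, hj, i, hi, hpre⟩; exact ⟨i, hi, q, hq, hj, hpre⟩

theorem pv_getD_foldl_names (ins : List String) :
    ∀ (found : List Bool), found.length = 9 → ∀ j : Nat,
      (ins.foldl pvScanName found).getD j false
        = (found.getD j false ||
           pvAllPairs.any (fun q => q.1.toNat == j &&
             ins.any (fun name =>
               (List.range name.toList.length).any (fun i => q.2.toList.isPrefixOf (name.toList.drop i))))) := by
  induction ins with
  | nil => intro found _ j; simp
  | cons name rest ih =>
    intro found hlen j
    simp only [List.foldl_cons, List.any_cons]
    rw [ih _ (by rw [pv_length_scanName]; exact hlen) j]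
    rw [pv_getD_scanName name found hlen j]
    rw [Bool.or_assoc]
    congr 1
    rw [Bool.eq_iff_iff]
    simp only [List.any_eq_true, Bool.and_eq_true, Bool.or_eq_true]
    constructor
    · rintro (⟨q, hq, hj, hpre⟩ | ⟨q, hq, hj, hpre⟩)
      · exact ⟨q, hq, hj, Or.inl hpre⟩
      · exact ⟨q, hq, hj, Or.inr hpre⟩
    · rintro ⟨q, hq, hj, hpre | hpre⟩
      · exact Or.inl ⟨q, hq, hj, hpre⟩
      · exact Or.inr ⟨q, hq, hj, hpre⟩

theorem pv_any_range_prefix (p : List Char) (hp : p ≠ []) (s : List Char) :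
    (List.range s.length).any (fun i => p.isPrefixOf (s.drop i)) = PySem.Chars.isIn p s := by
  rw [Bool.eq_iff_iff]
  constructor
  · intro h
    obtain ⟨i, _, hpre⟩ := List.any_eq_true.mp h
    exact (PySem.Chars.exists_prefix_drop_iff_isIn p s).mp ⟨i, List.isPrefixOf_iff_prefix.mp hpre⟩
  · intro h
    obtain ⟨i, hpre⟩ := (PySem.Chars.exists_prefix_drop_iff_isIn p s).mpr h
    have hdne : s.drop i ≠ [] := by
      intro hnil
      rw [hnil] at hpre
      exact hp (List.prefix_nil.mp hpre)
    have hi : i < s.length := by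
      by_contra hge
      exact hdne (List.drop_eq_nil_iff.mpr (by omega))
    exact List.any_eq_true.mpr ⟨i, List.mem_range.mpr hi, List.isPrefixOf_iff_prefix.mpr hpre⟩

theorem pv_any_congr {α : Type} (l : List α) (f g : α → Bool) (h : ∀ x ∈ l, f x = g x) :
    l.any f = l.any g := by
  induction l with
  | nil => rfl
  | cons x xs ih =>
    simp only [List.any_cons, h x List.mem_cons_self,
      ih (fun y hy => h y (List.mem_cons_of_mem _ hy))]

theorem pv_flag (ins : List String) (j : Nat) :
    (ins.foldl pvScanName (List.replicate pvCommonApis.length false)).getD j false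
      = pvAllPairs.any (fun q => q.1.toNat == j &&
          ins.any (fun name => PySem.Chars.isIn q.2.toList name.toList)) := by
  rw [pv_getD_foldl_names ins _ (by simp [pvCommonApis]) j]
  have hrep : (List.replicate pvCommonApis.length false).getD j false = false := by
    simp only [List.getD_eq_getElem?_getD, List.getElem?_replicate]
    split_ifs <;> rfl
  rw [hrep, Bool.false_or]
  apply pv_any_congr
  intro q hq
  congr 1
  apply pv_any_congr
  intro name _
  exact pv_any_range_prefix q.2.toList ((by decide : ∀ q ∈ pvAllPairs, q.2.toList ≠ []) q hq) name.toList

set_option maxHeartbeats 1000000 in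
theorem pv_final (ins : List String) :
    find_missing_common_apis_py ins = find_missing_common_apis_py_alt ins := by
  unfold find_missing_common_apis_py find_missing_common_apis_py_alt
  rw [PySem.List.foldl_append_if_eq_filter]
  simp only [List.nil_append]
  rw [PySem.List.foldl_append_if (l := PySem.List.enumerate pvCommonApis 0)
      (p := fun q => !(PySem.List.pyGetD (ins.foldl pvScanName (List.replicate pvCommonApis.length false)) q.1 false))
      (f := fun q => q.2)]
  have henum : PySem.List.enumerate pvCommonApis 0 = [((0:Int),"CreateFile"), ((1:Int),"ReadFile"), ((2:Int),"WriteFile"), ((3:Int),"CloseHandle"), ((4:Int),"VirtualAlloc"), ((5:Int),"MessageBox"), ((6:Int),"GetCurrentProcess"), ((7:Int),"CreateThread"), ((8:Int),"WaitForSingleObject")] := by rfl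
  have e0 : PySem.List.pyGetD (ins.foldl pvScanName (List.replicate pvCommonApis.length false)) (0:Int) false = ins.any (fun name => PySem.Str.isIn (PySem.Str.lower "CreateFile") name) := by
    simp only [PySem.List.pyGetD_ofNat', pv_flag ins 0]
    simp [pvAllPairs, PySem.Str.isIn_eq, show (PySem.Str.lower "CreateFile").toList = "createfile".toList from by decide]
  have e1 : PySem.List.pyGetD (ins.foldl pvScanName (List.replicate pvCommonApis.length false)) (1:Int) false = ins.any (fun name => PySem.Str.isIn (PySem.Str.lower "ReadFile") name) := by
    simp only [PySem.List.pyGetD_ofNat', pv_flag ins 1]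
    simp [pvAllPairs, PySem.Str.isIn_eq, show (PySem.Str.lower "ReadFile").toList = "readfile".toList from by decide]
  have e2 : PySem.List.pyGetD (ins.foldl pvScanName (List.replicate pvCommonApis.length false)) (2:Int) false = ins.any (fun name => PySem.Str.isIn (PySem.Str.lower "WriteFile") name) := by
    simp only [PySem.List.pyGetD_ofNat', pv_flag ins 2]
    simp [pvAllPairs, PySem.Str.isIn_eq, show (PySem.Str.lower "WriteFile").toList = "writefile".toList from by decide]
  have e3 : PySem.List.pyGetD (ins.foldl pvScanName (List.replicate pvCommonApis.length false)) (3:Int) false = ins.any (fun name => PySem.Str.isIn (PySem.Str.lower "CloseHandle") name) := by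
    simp only [PySem.List.pyGetD_ofNat', pv_flag ins 3]
    simp [pvAllPairs, PySem.Str.isIn_eq, show (PySem.Str.lower "CloseHandle").toList = "closehandle".toList from by decide]
  have e4 : PySem.List.pyGetD (ins.foldl pvScanName (List.replicate pvCommonApis.length false)) (4:Int) false = ins.any (fun name => PySem.Str.isIn (PySem.Str.lower "VirtualAlloc") name) := by
    simp only [PySem.List.pyGetD_ofNat', pv_flag ins 4]
    simp [pvAllPairs, PySem.Str.isIn_eq, show (PySem.Str.lower "VirtualAlloc").toList = "virtualalloc".toList from by decide]
  have e5 : PySem.List.pyGetD (ins.foldl pvScanName (List.replicate pvCommonApis.length false)) (5:Int) false = ins.any (fun name => PySem.Str.isIn (PySem.Str.lower "MessageBox") name) := by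
    simp only [PySem.List.pyGetD_ofNat', pv_flag ins 5]
    simp [pvAllPairs, PySem.Str.isIn_eq, show (PySem.Str.lower "MessageBox").toList = "messagebox".toList from by decide]
  have e6 : PySem.List.pyGetD (ins.foldl pvScanName (List.replicate pvCommonApis.length false)) (6:Int) false = ins.any (fun name => PySem.Str.isIn (PySem.Str.lower "GetCurrentProcess") name) := by
    simp only [PySem.List.pyGetD_ofNat', pv_flag ins 6]
    simp [pvAllPairs, PySem.Str.isIn_eq, show (PySem.Str.lower "GetCurrentProcess").toList = "getcurrentprocess".toList from by decide]
  have e7 : PySem.List.pyGetD (ins.foldl pvScanName (List.replicate pvCommonApis.length false)) (7:Int) false = ins.any (fun name => PySem.Str.isIn (PySem.Str.lower "CreateThread") name) := by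
    simp only [PySem.List.pyGetD_ofNat', pv_flag ins 7]
    simp [pvAllPairs, PySem.Str.isIn_eq, show (PySem.Str.lower "CreateThread").toList = "createthread".toList from by decide]
  have e8 : PySem.List.pyGetD (ins.foldl pvScanName (List.replicate pvCommonApis.length false)) (8:Int) false = ins.any (fun name => PySem.Str.isIn (PySem.Str.lower "WaitForSingleObject") name) := by
    simp only [PySem.List.pyGetD_ofNat', pv_flag ins 8]
    simp [pvAllPairs, PySem.Str.isIn_eq, show (PySem.Str.lower "WaitForSingleObject").toList = "waitforsingleobject".toList from by decide]
  rw [henum]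
  simp only [List.filter_cons, List.filter_nil]
  rw [e0, e1, e2, e3, e4, e5, e6, e7, e8]
  simp only [List.nil_append, apply_ite (List.map (fun q : Int × String => q.2)),
    List.map_cons, List.map_nil, pvCommonApis, List.filter_cons, List.filter_nil]

-- ===== VERDICT (by name: the statement is the Claim_ definition above) =====
theorem find_missing_common_apis_py_spec : Claim_equal_find_missing_common_apis_py := by
  intro import_names _
  exact pv_final import_names
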